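-- pv_equiv track=rewrite | github.com/miliar/Code_Jam_Webscraper | solutions_python/Problem_96/1497.py | getSurpriseMaxMark
-- ===== SOURCE A (Python) =====
-- def getSurpriseMaxMark(overall):
--     marks = range(11)
--     results = []
--     for x in marks:
--         for y in marks:
--             for z in marks:
--                 if(
--                     (x + y + z == overall) and
--                     max(abs(x - y), abs(y - z), abs(z-x)) == 2
--                     ):
--                     results.append(max(x, y, z))
--     if results:
--         return max(results)
-- ===== SOURCE B (Python) =====
-- def getSurpriseMaxMark(overall):
--     # A valid triple has max - min == 2, so for top mark p the sums are 3p-4..3p-2;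
--     # the windows are disjoint and tile [2, 28], giving a closed form.
--     if 2 <= overall <= 28:
--         return (overall + 4) // 3
--     return None
-- ===== Notes on version B (the rewrite author's own statement) =====
-- stated objective: simpler
-- what changed: Replaced the 11x11x11 exhaustive triple scan with a closed form: a surprising triple has max-min=2, so top marks p cover disjoint sum windows [3p-4,3p-2] tiling [2,28], giving (overall+4)//3 when 2<=overall<=28, else None.
import Mathlib
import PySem

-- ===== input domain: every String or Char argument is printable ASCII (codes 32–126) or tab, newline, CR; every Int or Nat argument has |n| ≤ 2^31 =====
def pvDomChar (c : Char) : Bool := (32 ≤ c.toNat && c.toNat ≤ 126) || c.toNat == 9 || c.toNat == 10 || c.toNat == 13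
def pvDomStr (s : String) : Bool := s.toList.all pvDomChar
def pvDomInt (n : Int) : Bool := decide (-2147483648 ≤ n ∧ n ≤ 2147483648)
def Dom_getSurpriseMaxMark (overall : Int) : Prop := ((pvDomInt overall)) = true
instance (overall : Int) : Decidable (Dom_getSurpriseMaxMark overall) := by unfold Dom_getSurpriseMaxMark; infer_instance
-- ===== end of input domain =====

-- B replaces A's 11×11×11 exhaustive scan by the closed form (overall+4)//3 on 2 ≤ overall ≤ 28 (simpler).

-- ===== PORT A =====
-- the triple loop building `results` (helper kept separate so the proofs can speak about it)
def pvResults (overall : Int) : List Int :=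
  let marks := PySem.List.pyRange 0 11 1
  marks.foldl (fun acc x =>
    marks.foldl (fun acc y =>
      marks.foldl (fun acc z =>
        if x + y + z = overall ∧ max |x - y| (max |y - z| |z - x|) = 2 then
          acc ++ [max x (max y z)]
        else acc) acc) acc) []

def getSurpriseMaxMark (overall : Int) : Option Int :=
  let results := pvResults overall
  if results ≠ [] then PySem.List.max? results (fun m => m) else none

-- ===== PORT B =====
def getSurpriseMaxMark_alt (overall : Int) : Option Int :=
  if 2 ≤ overall ∧ overall ≤ 28 then some (PySem.Int.floordiv (overall + 4) 3)
  else none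

-- ===== PRECONDITION & SPEC =====
def Spec_getSurpriseMaxMark (overall : Int) (out : Option Int) : Prop := out = getSurpriseMaxMark_alt overall
instance (overall : Int) (out : Option Int) : Decidable (Spec_getSurpriseMaxMark overall out) := by unfold Spec_getSurpriseMaxMark; infer_instance

-- ===== CLAIM (what is proved, stated in full; the proofs are below) =====
def Claim_equal_getSurpriseMaxMark : Prop := ∀ (overall : Int), Dom_getSurpriseMaxMark overall → Spec_getSurpriseMaxMark overall (getSurpriseMaxMark overall)

-- ===== LEMMAS AND PROOFS =====

theorem foldl_if_false {α β : Type} (l : List β) (p : β → Prop) [DecidablePred p]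
    (f : β → α) (acc : List α) (h : ∀ x ∈ l, ¬ p x) :
    l.foldl (fun a x => if p x then a ++ [f x] else a) acc = acc := by
  induction l generalizing acc with
  | nil => rfl
  | cons b t ih =>
    simp only [List.foldl_cons]
    rw [if_neg (h b (List.mem_cons_self))]
    exact ih acc (fun x hx => h x (List.mem_cons_of_mem _ hx))

theorem foldl_const {α β : Type} (l : List β) (acc : α) :
    l.foldl (fun a _ => a) acc = acc := by
  induction l with
  | nil => rfl
  | cons b t ih => simp only [List.foldl_cons]; exact ih

theorem pvResults_empty (overall : Int)
    (h : overall < 0 ∨ 30 < overall) : pvResults overall = [] := by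
  unfold pvResults
  have stepy : ∀ (x : Int), 0 ≤ x → x < 11 →
      ∀ (acc : List Int) (y : Int), y ∈ PySem.List.pyRange 0 11 1 →
        (PySem.List.pyRange 0 11 1).foldl (fun acc z =>
          if x + y + z = overall ∧ max |x - y| (max |y - z| |z - x|) = 2 then
            acc ++ [max x (max y z)]
          else acc) acc = acc := by
    intro x hx0 hx1 acc y hy
    have hy' := (PySem.List.mem_pyRange_one).1 hy
    refine foldl_if_false _ _ _ acc ?_
    intro z hz
    have hz' := (PySem.List.mem_pyRange_one).1 hz
    rintro ⟨hsum, -⟩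
    omega
  have step : ∀ (acc : List Int) (x : Int), x ∈ PySem.List.pyRange 0 11 1 →
      (PySem.List.pyRange 0 11 1).foldl (fun acc y =>
        (PySem.List.pyRange 0 11 1).foldl (fun acc z =>
          if x + y + z = overall ∧ max |x - y| (max |y - z| |z - x|) = 2 then
            acc ++ [max x (max y z)]
          else acc) acc) acc = acc := by
    intro acc x hx
    have hx' := (PySem.List.mem_pyRange_one).1 hx
    exact (PySem.List.foldl_congr_mem _ _ (fun (a : List Int) (_ : Int) => a) _
      (fun acc y hy => stepy x hx'.1 hx'.2 acc y hy)).trans (foldl_const _ _)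
  exact (PySem.List.foldl_congr_mem _ _ (fun (a : List Int) (_ : Int) => a) _
    (fun acc x hx => step acc x hx)).trans (foldl_const _ _)

-- ===== VERDICT (by name: the statement is the Claim_ definition above) =====
set_option maxRecDepth 4000 in
set_option maxHeartbeats 4000000 in
theorem getSurpriseMaxMark_spec : Claim_equal_getSurpriseMaxMark := by
  intro overall _
  unfold Spec_getSurpriseMaxMark
  by_cases h : 0 ≤ overall ∧ overall ≤ 30
  · obtain ⟨h1, h2⟩ := h
    interval_cases overall <;> decide
  · have hno : ¬(2 ≤ overall ∧ overall ≤ 28) := by omega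
    unfold getSurpriseMaxMark getSurpriseMaxMark_alt
    rw [pvResults_empty overall (by omega)]
    simp [hno]
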